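-- pv_equiv track=rewrite | github.com/qwl2333/leetcode-py3 | Companies/Meta/String/valid-number.py | is_unsigned_decimal
-- ===== SOURCE A (Python) =====
-- def is_unsigned_decimal(s: str, start: int, end: int) -> bool:
--     if start > end:
--         return False
--     count_dot = 0
--     count_digits_before_dot = 0
--     count_digits_after_dot = 0
--     for i in range(start, end + 1):
--         if s[i].isdigit():
--             if count_dot == 0:
--                 count_digits_before_dot += 1
--             else:
--                 count_digits_after_dot += 1
--         elif s[i] == '.':
--             count_dot += 1
--             if count_dot > 1:
--                 return False
--         else:
--             return False
--
--     if count_dot == 1 and (count_digits_before_dot > 0 and count_digits_after_dot == 0) \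
--         or (count_digits_before_dot > 0 and count_digits_after_dot > 0) \
--         or (count_digits_before_dot == 0 and count_digits_after_dot > 0):
--         return True
--     else:
--         return False
-- ===== SOURCE B (Python) =====
-- def is_unsigned_decimal(s: str, start: int, end: int) -> bool:
--     # Gather the characters once (same indexing semantics as A, including
--     # negative-index wraparound and IndexError on out-of-range), then decide
--     # by counting instead of running a dot/before/after state machine.
--     if start > end:
--         return False
--     chars = [s[i] for i in range(start, end + 1)]
--     digits = [c for c in chars if c != '.']
--     return chars.count('.') == 1 and bool(digits) and all(c.isdigit() for c in digits)
-- ===== Notes on version B (the rewrite author's own statement) =====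
-- stated objective: simpler
-- what changed: A runs a dot/before-dot/after-dot counter state machine with early exits over the index range; B gathers the characters once and decides by counting: exactly one '.', and the non-dot characters nonempty and all digits.
-- outside the precondition, e.g. on is_unsigned_decimal('a', 0, 5): A returns False, B raises IndexError
import Mathlib
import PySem

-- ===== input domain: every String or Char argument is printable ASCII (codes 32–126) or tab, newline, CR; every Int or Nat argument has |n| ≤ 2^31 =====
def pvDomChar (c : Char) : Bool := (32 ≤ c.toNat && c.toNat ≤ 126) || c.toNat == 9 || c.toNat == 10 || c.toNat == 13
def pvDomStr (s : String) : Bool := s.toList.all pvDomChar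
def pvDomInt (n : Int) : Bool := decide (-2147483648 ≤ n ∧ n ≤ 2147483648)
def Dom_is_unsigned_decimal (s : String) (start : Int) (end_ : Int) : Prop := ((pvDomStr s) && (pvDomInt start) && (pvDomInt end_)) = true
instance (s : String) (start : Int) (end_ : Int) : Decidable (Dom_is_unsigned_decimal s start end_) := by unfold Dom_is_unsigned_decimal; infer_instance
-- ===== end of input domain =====

-- B gathers the characters of s[start..end] once and decides by counting
-- ('.'-count = 1, and the remaining characters nonempty and all digits)
-- instead of A's dot/before/after state machine with early exit (objective: simpler).


-- ===== PORT A =====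
-- the for-loop over range(start, end+1) with the three counters; an early
-- 'return False' ends the recursion. s[i] is PySem.Str.pyGet?; the 'none'
-- (IndexError) case is excluded by Pre_, the ' ' default there hits the
-- final 'else: return False' branch.
def isudGo (s : String) : List Int → Int → Int → Int → Bool
  | [], count_dot, before, after =>
      if (count_dot = 1 ∧ before > 0 ∧ after = 0) ∨ (before > 0 ∧ after > 0)
          ∨ (before = 0 ∧ after > 0) then true else false
  | i :: rest, count_dot, before, after =>
      let c := (PySem.Str.pyGet? s i).getD ' '
      if PySem.Chars.isdigit c then
        if count_dot = 0 then isudGo s rest count_dot (before + 1) after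
        else isudGo s rest count_dot before (after + 1)
      else if c = '.' then
        if count_dot + 1 > 1 then false else isudGo s rest (count_dot + 1) before after
      else false

def is_unsigned_decimal (s : String) (start : Int) (end_ : Int) : Bool :=
  if start > end_ then false
  else isudGo s (PySem.List.pyRange start (end_ + 1) 1) 0 0 0

-- ===== PORT B =====
def is_unsigned_decimal_alt (s : String) (start : Int) (end_ : Int) : Bool :=
  if start > end_ then false
  else
    let chars := (PySem.List.pyRange start (end_ + 1) 1).map
      (fun i => (PySem.Str.pyGet? s i).getD ' ')
    let digits := chars.filter (fun c => !(c == '.'))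
    (PySem.List.count chars '.' == 1) && !digits.isEmpty
      && digits.all (fun c => PySem.Chars.isdigit c)

-- ===== PRECONDITION & SPEC =====
-- Pre_ admits empty ranges and ranges whose indices are all in bounds (Python
-- negative indexing included). It excludes every input where Python A raises
-- IndexError, and also inputs where an out-of-bounds range makes A return False
-- early before reaching the bad index while B's comprehension raises there
-- (see claim.json "cites").
def Pre_is_unsigned_decimal (s : String) (start : Int) (end_ : Int) : Prop :=
  start > end_ ∨ (-(s.toList.length : Int) ≤ start ∧ end_ < (s.toList.length : Int))
instance (s : String) (start : Int) (end_ : Int) : Decidable (Pre_is_unsigned_decimal s start end_) := by unfold Pre_is_unsigned_decimal; infer_instance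

def pvWitness_is_unsigned_decimal : String × Int × Int := ("1.25", 0, 3)

def Spec_is_unsigned_decimal (s : String) (start : Int) (end_ : Int) (out : Bool) : Prop := out = is_unsigned_decimal_alt s start end_
instance (s : String) (start : Int) (end_ : Int) (out : Bool) : Decidable (Spec_is_unsigned_decimal s start end_ out) := by unfold Spec_is_unsigned_decimal; infer_instance

-- ===== CLAIM (what is proved, stated in full; the proofs are below) =====
def Claim_equal_is_unsigned_decimal : Prop := ∀ (s : String) (start : Int) (end_ : Int), Dom_is_unsigned_decimal s start end_ → Pre_is_unsigned_decimal s start end_ → Spec_is_unsigned_decimal s start end_ (is_unsigned_decimal s start end_)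

-- ===== LEMMAS AND PROOFS =====

-- After the dot (count_dot = 1): A accepts iff the rest are all digits and
-- some digit was or will be seen.
lemma isudGo_one (s : String) (cs : List Int) :
    ∀ (b a : Int), 0 ≤ b → 0 ≤ a →
    isudGo s cs 1 b a =
      ((cs.map (fun i => (PySem.Str.pyGet? s i).getD ' ')).all PySem.Chars.isdigit
        && (decide (0 < b) || decide (0 < a + (cs.length : Int)))) := by
  induction cs with
  | nil =>
      intro b a hb ha
      simp only [isudGo, List.map_nil, List.all_nil, Bool.true_and, List.length_nil,
        Nat.cast_zero, add_zero]
      split_ifs with h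
      · simp only [true_and] at h
        symm; simp only [Bool.or_eq_true, decide_eq_true_eq]; omega
      · simp only [true_and] at h
        symm; simp only [Bool.or_eq_false_iff, decide_eq_false_iff_not]; omega
  | cons i rest ih =>
      intro b a hb ha
      simp only [isudGo, List.map_cons, List.all_cons, List.length_cons]
      obtain ⟨c, hc⟩ : ∃ c, (PySem.Str.pyGet? s i).getD ' ' = c := ⟨_, rfl⟩
      rw [hc]
      by_cases hd : PySem.Chars.isdigit c = true
      · rw [if_pos hd]
        simp only [show ((1 : Int) = 0) = False from by simp, if_false]
        rw [ih b (a + 1) hb (by omega)]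
        simp only [hd, Bool.true_and]
        push_cast
        rw [show a + 1 + (rest.length : Int) = a + ((rest.length : Int) + 1) from by ring]
      · have hdF : PySem.Chars.isdigit c = false := by simpa using hd
        rw [if_neg hd]
        by_cases he : c = '.'
        · rw [if_pos he, if_pos (by omega : (1 : Int) + 1 > 1)]
          simp [hdF]
        · rw [if_neg he]
          simp [hdF]

-- Before the dot (count_dot = 0, after = 0): A accepts iff there is exactly
-- one dot, the non-dot characters are all digits, and a digit exists.
lemma isudGo_zero (s : String) (cs : List Int) :
    ∀ (b : Int), 0 ≤ b →
    isudGo s cs 0 b 0 =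
      (let l := cs.map (fun i => (PySem.Str.pyGet? s i).getD ' ')
       let digits := l.filter (fun c => !(c == '.'))
       decide (l.count '.' = 1) && digits.all PySem.Chars.isdigit
         && (decide (0 < b) || !digits.isEmpty)) := by
  induction cs with
  | nil =>
      intro b hb
      simp [isudGo]
  | cons i rest ih =>
      intro b hb
      simp only [isudGo, List.map_cons]
      obtain ⟨c, hc⟩ : ∃ c, (PySem.Str.pyGet? s i).getD ' ' = c := ⟨_, rfl⟩
      simp only [hc]
      by_cases hd : PySem.Chars.isdigit c = true
      · have hne : (c == '.') = false := by
          apply beq_eq_false_iff_ne.mpr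
          intro h; rw [h] at hd; simp [PySem.Chars.isdigit] at hd
        rw [if_pos hd]
        simp only [if_true]
        rw [ih (b + 1) (by omega)]
        have hb1 : decide (0 < b + 1) = true := by simp; omega
        simp only [List.filter_cons, List.count_cons, hne, Bool.not_false, if_true, if_false,
          Bool.false_eq_true, List.all_cons, hd, Bool.true_and, List.isEmpty_cons, Bool.or_true,
          hb1, Bool.true_or, add_zero]
      · have hdF : PySem.Chars.isdigit c = false := by simpa using hd
        rw [if_neg hd]
        by_cases he : c = '.'
        · rw [if_pos he, if_neg (by omega : ¬ (0 : Int) + 1 > 1)]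
          rw [show (0 : Int) + 1 = 1 from by ring, isudGo_one s rest b 0 hb le_rfl]
          simp only [List.filter_cons, List.count_cons, he]
          simp only [beq_self_eq_true, Bool.not_true, zero_add]
          set l := rest.map (fun i => (PySem.Str.pyGet? s i).getD ' ') with hl
          have hcount : (l.count '.' + 1 = 1) ↔ ('.' ∉ l) := by
            constructor
            · intro h; exact List.count_eq_zero.mp (by omega)
            · intro h; rw [List.count_eq_zero.mpr h]
          by_cases hall : l.all PySem.Chars.isdigit = true
          · have hnm : '.' ∉ l := by
              intro hm
              have := List.all_eq_true.mp hall '.' hm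
              simp [PySem.Chars.isdigit] at this
            have hfilter : l.filter (fun c => !(c == '.')) = l := by
              apply List.filter_eq_self.mpr
              intro x hx; simp; rintro rfl; exact hnm hx
            simp only [hall, hfilter, Bool.true_and]
            by_cases hbpos : 0 < b
            · simp only [hbpos, decide_true, Bool.true_or]
              simp
              exact ⟨List.count_eq_zero.mpr hnm, List.all_eq_true.mp hall⟩
            · have hb0 : b = 0 := by omega
              subst hb0
              simp only [lt_self_iff_false, decide_false, Bool.false_or]
              have hlen : (rest.length : Int) = (l.length : Int) := by rw [hl]; simp
              rw [hlen]
              clear_value l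
              clear hl ih hc
              cases l with
              | nil => simp
              | cons x xs =>
                  simp
                  refine ⟨List.count_eq_zero.mpr hnm, ?_, ?_⟩
                  · exact (List.all_eq_true.mp hall) x (by simp)
                  · intro y hy
                    exact (List.all_eq_true.mp hall) y (by simp [hy])
          · have hallF : l.all PySem.Chars.isdigit = false := by simpa using hall
            simp only [hallF]
            symm
            rw [List.all_eq_false] at hallF
            obtain ⟨x, hx, hxd⟩ := hallF
            by_cases hxdot : x = '.'
            · subst hxdot
              simp
              intro h0 _
              exact absurd hx (List.count_eq_zero.mp h0)
            · have hxf : x ∈ l.filter (fun c => !(c == '.')) := by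
                simp [List.mem_filter, hx, hxdot]
              have hfa : (l.filter (fun c => !(c == '.'))).all PySem.Chars.isdigit = false := by
                rw [List.all_eq_false]
                exact ⟨x, hxf, by simpa using hxd⟩
              simp [hfa]
        · rw [if_neg he]
          have hcf : c ∈ (c :: rest.map (fun i => (PySem.Str.pyGet? s i).getD ' ')).filter
              (fun c => !(c == '.')) := by
            simp [he]
          have hfa : ((c :: rest.map (fun i => (PySem.Str.pyGet? s i).getD ' ')).filter
              (fun c => !(c == '.'))).all PySem.Chars.isdigit = false := by
            rw [List.all_eq_false]
            exact ⟨c, hcf, by simpa using hdF⟩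
          rw [hfa]
          simp

-- ===== VERDICT (by name: the statement is the Claim_ definition above) =====
theorem is_unsigned_decimal_spec : Claim_equal_is_unsigned_decimal := by
  intro s start end_ _ _
  unfold Spec_is_unsigned_decimal is_unsigned_decimal is_unsigned_decimal_alt
  by_cases h : start > end_
  · simp [h]
  · simp only [h, if_false]
    rw [isudGo_zero s (PySem.List.pyRange start (end_ + 1) 1) 0 le_rfl]
    simp only [lt_self_iff_false, decide_false, Bool.false_or, PySem.List.count_eq]
    set l := (PySem.List.pyRange start (end_ + 1) 1).map
      (fun i => (PySem.Str.pyGet? s i).getD ' ') with hl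
    set digits := l.filter (fun c => !(c == '.')) with hdg
    cases hcount : decide (l.count '.' = 1) <;>
      cases hemp : digits.isEmpty <;>
      cases hall : digits.all (fun c => PySem.Chars.isdigit c) <;>
      simp_all [Bool.and_comm]
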